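-- pv_equiv track=rewrite | github.com/SenforQ/Royo | generate_user_profiles.py | check_sensitive_words
-- ===== SOURCE A (Python) =====
-- def check_sensitive_words(text):
--     """检查敏感词汇"""
--     sensitive_words = [
--         "government", "legal", "law", "hospital", "medical", "doctor", "nurse",
--         "police", "court", "judge", "lawyer", "attorney", "clinic", "surgery",
--         "president", "minister", "official", "authority", "regulation", "policy"
--     ]
--     text_lower = text.lower()
--     for word in sensitive_words:
--         if word in text_lower:
--             return True
--     return False
-- ===== SOURCE B (Python) =====
-- def check_sensitive_words(text):
--     """检查敏感词汇"""
--     words = ("government legal law hospital medical doctor nurse police court "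
--              "judge lawyer attorney clinic surgery president minister official "
--              "authority regulation policy").split()
--     by_first = {}
--     for w in words:
--         by_first.setdefault(w[0], []).append(w)
--     low = text.lower()
--     for i, c in enumerate(low):
--         for w in by_first.get(c, ()):
--             if low.startswith(w, i):
--                 return True
--     return False
-- ===== Notes on version B (the rewrite author's own statement) =====
-- stated objective: alternative
-- what changed: B replaces A's word-major strategy (20 separate 'word in text' substring scans over the lowered text) with an index-driven position-major scan: it builds a first-letter bucket dictionary of the words once, then makes a single left-to-right pass over the lowered text, at each position testing as prefixes only the words whose first letter matches the current character.
import Mathlib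
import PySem

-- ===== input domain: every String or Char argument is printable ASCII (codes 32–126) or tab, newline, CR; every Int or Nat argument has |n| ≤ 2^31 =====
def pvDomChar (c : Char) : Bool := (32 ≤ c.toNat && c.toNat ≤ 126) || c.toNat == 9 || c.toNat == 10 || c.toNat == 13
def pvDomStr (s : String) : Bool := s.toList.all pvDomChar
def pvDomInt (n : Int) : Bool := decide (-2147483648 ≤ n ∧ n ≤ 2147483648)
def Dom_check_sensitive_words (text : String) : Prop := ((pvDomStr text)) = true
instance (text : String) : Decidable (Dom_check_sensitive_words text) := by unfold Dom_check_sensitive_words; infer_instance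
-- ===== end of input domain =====

-- B builds a first-letter bucket index once and makes one position-major pass over the lowered
-- text, testing only same-initial words as prefixes at each position, instead of A's 20 separate
-- word-major substring scans; equivalence of return values is proved.


-- ===== PORT A =====
-- A's local list of sensitive words
def sensitiveWordsA : List String :=
  ["government", "legal", "law", "hospital", "medical", "doctor", "nurse",
   "police", "court", "judge", "lawyer", "attorney", "clinic", "surgery",
   "president", "minister", "official", "authority", "regulation", "policy"]

-- A's 'for word in sensitive_words: if word in text_lower: return True' loop
def loopA (text_lower : String) : List String → Bool
  | [] => false
  | w :: ws => if PySem.Str.isIn w text_lower then true else loopA text_lower ws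

def check_sensitive_words (text : String) : Bool :=
  let text_lower := PySem.Str.lower text
  loopA text_lower sensitiveWordsA

-- ===== PORT B =====
-- B's words, one whitespace-separated literal split at runtime
def wordsB : List String :=
  PySem.Str.split₀ ("government legal law hospital medical doctor nurse police court judge lawyer attorney clinic surgery president minister official authority regulation policy")

-- w[0]; every word of wordsB is nonempty, so the ' ' default is never used
def headCharB (w : String) : Char := w.toList.headD ' '

-- for w in words: by_first.setdefault(w[0], []).append(w)
def indexB : PySem.Dict Char (List String) :=
  wordsB.foldl (fun d w => d.modify (headCharB w) [] (· ++ [w])) PySem.Dict.empty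

-- for i, c in enumerate(low): for w in by_first.get(c, ()): if low.startswith(w, i): return True
-- (the suffix low[i:] is carried structurally: startswith(w, i) = w.toList.isPrefixOf (drop i))
def scanB (idx : PySem.Dict Char (List String)) : List Char → Bool
  | [] => false
  | c :: rest =>
      if (idx.getD c []).any (fun w => w.toList.isPrefixOf (c :: rest)) then true
      else scanB idx rest

def check_sensitive_words_alt (text : String) : Bool :=
  scanB indexB (PySem.Str.lower text).toList

-- ===== PRECONDITION & SPEC =====
def Spec_check_sensitive_words (text : String) (out : Bool) : Prop := out = check_sensitive_words_alt text
instance (text : String) (out : Bool) : Decidable (Spec_check_sensitive_words text out) := by unfold Spec_check_sensitive_words; infer_instance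

-- ===== CLAIM (what is proved, stated in full; the proofs are below) =====
def Claim_equal_check_sensitive_words : Prop := ∀ (text : String), Dom_check_sensitive_words text → Spec_check_sensitive_words text (check_sensitive_words text)

-- ===== LEMMAS AND PROOFS =====

set_option maxRecDepth 8000 in
theorem wordsB_eq : wordsB = sensitiveWordsA := by decide

set_option maxRecDepth 8000 in
theorem wordsB_nonempty : ∀ w ∈ wordsB, w.toList ≠ [] := by decide

theorem loopA_eq_any (s : String) (ws : List String) :
    loopA s ws = ws.any (fun w => PySem.Str.isIn w s) := by
  induction ws with
  | nil => rfl
  | cons w ws ih => cases h : PySem.Str.isIn w s <;> simp [loopA, ih, h]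

theorem foldl_mod_pairs (l : List String) (d : PySem.Dict Char (List String)) :
    l.foldl (fun d w => d.modify (headCharB w) [] (· ++ [w])) d =
      (l.map (fun w => (headCharB w, w))).foldl
        (fun d p => d.modify p.1 [] (· ++ [p.2])) d := by
  induction l generalizing d with
  | nil => rfl
  | cons w ws ih => simp only [List.map_cons, List.foldl_cons, ih]

-- the bucket of c holds exactly the words whose first letter is c, in order
theorem bucket_eq (c : Char) :
    indexB.getD c [] = wordsB.filter (fun w => headCharB w == c) := by
  unfold indexB
  rw [foldl_mod_pairs, PySem.Dict.getD_foldl_modify_append]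
  simp [List.filter_map, List.map_map, Function.comp_def]

theorem mem_bucket (c : Char) (w : String) :
    w ∈ indexB.getD c [] ↔ w ∈ wordsB ∧ headCharB w = c := by
  rw [bucket_eq]; simp [List.mem_filter]

-- a nonempty word is a prefix of c :: rest iff its first letter is c and it is a prefix
theorem prefix_cons_head (w : String) (hw : w.toList ≠ []) (c : Char) (rest : List Char) :
    w.toList.isPrefixOf (c :: rest) = true ↔ headCharB w = c ∧ w.toList <+: (c :: rest) := by
  cases h : w.toList with
  | nil => exact absurd h hw
  | cons c0 tl =>
    simp only [List.isPrefixOf_iff_prefix, headCharB, h, List.headD_cons,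
      List.cons_prefix_cons]
    constructor
    · rintro ⟨hc, hp⟩; exact ⟨hc, hc, hp⟩
    · rintro ⟨_, hc, hp⟩; exact ⟨hc, hp⟩

theorem scanB_iff (l : List Char) :
    scanB indexB l = true ↔ ∃ w ∈ wordsB, w.toList <:+: l := by
  induction l with
  | nil =>
    constructor
    · intro h; exact absurd h (by decide)
    · rintro ⟨w, hw, hinf⟩
      exact absurd (List.eq_nil_of_infix_nil hinf) (wordsB_nonempty w hw)
  | cons c rest ih =>
    show (if (indexB.getD c []).any (fun w => w.toList.isPrefixOf (c :: rest)) = true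
          then true else scanB indexB rest) = true ↔ _
    by_cases hb : (indexB.getD c []).any (fun w => w.toList.isPrefixOf (c :: rest)) = true
    · rw [if_pos hb]
      simp only [true_iff]
      obtain ⟨w, hwmem, hpre⟩ := List.any_eq_true.mp hb
      obtain ⟨hwin, _⟩ := (mem_bucket c w).mp hwmem
      exact ⟨w, hwin,
        ((prefix_cons_head w (wordsB_nonempty w hwin) c rest).mp hpre).2.isInfix⟩
    · rw [if_neg hb, ih]
      constructor
      · rintro ⟨w, hw, hinf⟩; exact ⟨w, hw, hinf.trans (List.infix_cons (List.infix_refl rest))⟩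
      · rintro ⟨w, hw, hinf⟩
        rcases List.infix_cons_iff.mp hinf with hp | hi
        · exfalso
          apply hb
          have hne := wordsB_nonempty w hw
          have hc : headCharB w = c := by
            cases h : w.toList with
            | nil => exact absurd h hne
            | cons c0 tl =>
              rw [h] at hp
              simp [headCharB, h, (List.cons_prefix_cons.mp hp).1]
          exact List.any_eq_true.mpr ⟨w, (mem_bucket c w).mpr ⟨hw, hc⟩,
            (prefix_cons_head w hne c rest).mpr ⟨hc, hp⟩⟩
        · exact ⟨w, hw, hi⟩

-- ===== VERDICT (by name: the statement is the Claim_ definition above) =====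
theorem check_sensitive_words_spec : Claim_equal_check_sensitive_words := by
  intro text _
  unfold Spec_check_sensitive_words check_sensitive_words check_sensitive_words_alt
  rw [loopA_eq_any, Bool.eq_iff_iff, scanB_iff, ← wordsB_eq]
  simp [List.any_eq_true, PySem.Chars.isIn_iff_infix]
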